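-- pv_equiv track=rewrite | github.com/ywy2090/WeDPR-Component | python/ppc_common/ppc_utils/ppc_model_config_parser.py | parse_read_hetero_dataset_loop
-- ===== SOURCE A (Python) =====
-- def parse_read_hetero_dataset_loop(participants):
--     loop_start = []
--     loop_end = []
--     start = ''
--     end = ''
--     for i in range(participants):
--         if i == 0 or i == participants - 1:
--             if i == 0:
--                 start = f'{start}source{i}_feature_count'
--                 end = f'{start} + source{i + 1}_feature_count'
--             else:
--                 start = f'{start} + source{i}_feature_count'
--                 end = f'{start} + source{i + 1}_feature_count'
--         else:
--             start = f'{start} + source{i}_feature_count'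
--             end = f'{start} + source{i + 1}_feature_count'
--         loop_start.append(start)
--         loop_end.append(end)
--     return participants - 1, loop_start[0:participants - 1], loop_end[0:participants - 1]
-- ===== SOURCE B (Python) =====
-- def parse_read_hetero_dataset_loop(participants):
--     terms = [f'source{i}_feature_count' for i in range(participants)]
--     prefixes = [' + '.join(terms[:i + 1]) for i in range(participants)]
--     # loop_start is the prefix joins without the last; loop_end is the same list shifted by one
--     return participants - 1, prefixes[0:participants - 1], prefixes[1:participants]
-- ===== Notes on version B (the rewrite author's own statement) =====
-- stated objective: simpler
-- what changed: B replaces A's running string accumulator and its first/last-iteration branch cascade by building the term table once and a single list of prefix joins, returning that list minus its last element and the same list shifted by one.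
import Mathlib
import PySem

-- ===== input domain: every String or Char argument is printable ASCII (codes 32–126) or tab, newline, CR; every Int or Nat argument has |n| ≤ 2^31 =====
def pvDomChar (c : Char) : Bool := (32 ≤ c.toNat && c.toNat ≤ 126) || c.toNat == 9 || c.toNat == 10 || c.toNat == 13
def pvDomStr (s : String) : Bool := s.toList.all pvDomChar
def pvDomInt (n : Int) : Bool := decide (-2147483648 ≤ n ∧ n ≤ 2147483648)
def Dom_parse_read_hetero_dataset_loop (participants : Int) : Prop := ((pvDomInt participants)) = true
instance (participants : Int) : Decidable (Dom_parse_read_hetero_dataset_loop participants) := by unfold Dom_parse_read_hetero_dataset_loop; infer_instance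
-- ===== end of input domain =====

-- B replaces A's running string accumulator and its first/last-iteration branch cascade by a
-- build-the-term-table-then-join-prefixes decomposition (objective: simpler); same return value.

-- ===== PORT A =====
-- A-side helper: the body of A's for-loop, named so the proofs can speak about one step
def pvStepA (participants : Int) (st : List String × List String × String × String) (i : Int) :
    List String × List String × String × String :=
  match st with
  | (loop_start, loop_end, start, _end) =>
    if i == 0 || i == participants - 1 then
      if i == 0 then
        let start := start ++ "source" ++ PySem.Int.toStr i ++ "_feature_count"
        let _end := start ++ " + source" ++ PySem.Int.toStr (i + 1) ++ "_feature_count"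
        (loop_start ++ [start], loop_end ++ [_end], start, _end)
      else
        let start := start ++ " + source" ++ PySem.Int.toStr i ++ "_feature_count"
        let _end := start ++ " + source" ++ PySem.Int.toStr (i + 1) ++ "_feature_count"
        (loop_start ++ [start], loop_end ++ [_end], start, _end)
    else
      let start := start ++ " + source" ++ PySem.Int.toStr i ++ "_feature_count"
      let _end := start ++ " + source" ++ PySem.Int.toStr (i + 1) ++ "_feature_count"
      (loop_start ++ [start], loop_end ++ [_end], start, _end)

def parse_read_hetero_dataset_loop (participants : Int) : Int × List String × List String :=
  let st := (PySem.List.pyRange 0 participants 1).foldl (pvStepA participants) ([], [], "", "")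
  (participants - 1,
   PySem.List.slice st.1 (some 0) (some (participants - 1)),
   PySem.List.slice st.2.1 (some 0) (some (participants - 1)))

-- ===== PORT B =====
def parse_read_hetero_dataset_loop_alt (participants : Int) : Int × List String × List String :=
  let terms := (PySem.List.pyRange 0 participants 1).map
    (fun i => "source" ++ PySem.Int.toStr i ++ "_feature_count")
  let prefixes := (PySem.List.pyRange 0 participants 1).map
    (fun i => PySem.Str.join " + " (PySem.List.slice terms none (some (i + 1))))
  (participants - 1,
   PySem.List.slice prefixes (some 0) (some (participants - 1)),
   PySem.List.slice prefixes (some 1) (some participants))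

-- ===== PRECONDITION & SPEC =====
def Spec_parse_read_hetero_dataset_loop (participants : Int) (out : Int × List String × List String) : Prop := out = parse_read_hetero_dataset_loop_alt participants
instance (participants : Int) (out : Int × List String × List String) : Decidable (Spec_parse_read_hetero_dataset_loop participants out) := by unfold Spec_parse_read_hetero_dataset_loop; infer_instance

-- ===== CLAIM (what is proved, stated in full; the proofs are below) =====
def Claim_equal_parse_read_hetero_dataset_loop : Prop := ∀ (participants : Int), Dom_parse_read_hetero_dataset_loop participants → Spec_parse_read_hetero_dataset_loop participants (parse_read_hetero_dataset_loop participants)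

-- ===== LEMMAS AND PROOFS =====

-- the i-th term string
def pvTerm (j : Int) : String := "source" ++ PySem.Int.toStr j ++ "_feature_count"

-- join of the first k terms
def pvJ (k : Nat) : String := PySem.Str.join " + " ((List.range k).map (fun j => pvTerm (Int.ofNat j)))

theorem ic_snoc (s t x : List Char) (l : List (List Char)) :
    s.intercalate (x :: (l ++ [t])) = s.intercalate (x :: l) ++ s ++ t := by
  induction l generalizing x with
  | nil => simp [List.intercalate]
  | cons y ys ih =>
      have h1 : s.intercalate (x :: y :: (ys ++ [t])) = x ++ s ++ s.intercalate (y :: (ys ++ [t])) := by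
        simp [List.intercalate, List.intersperse_cons₂]
      have h2 : s.intercalate (x :: y :: ys) = x ++ s ++ s.intercalate (y :: ys) := by
        simp [List.intercalate, List.intersperse_cons₂]
      rw [List.cons_append, h1, ih, h2]
      simp [List.append_assoc]

theorem join_snoc (s t : String) (l : List String) (hl : l ≠ []) :
    PySem.Str.join s (l ++ [t]) = PySem.Str.join s l ++ s ++ t := by
  cases l with
  | nil => exact absurd rfl hl
  | cons x l =>
      apply String.ext
      simp [PySem.Str.toList_join, String.toList_append, PySem.Chars.join]
      rw [ic_snoc]
      simp [List.append_assoc]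

theorem join_singleton (s x : String) : PySem.Str.join s [x] = x := by
  apply String.ext
  simp [PySem.Str.toList_join, PySem.Chars.join, List.intercalate]

theorem pvJ_succ (k : Nat) (hk : 1 ≤ k) : pvJ (k + 1) = pvJ k ++ " + " ++ pvTerm (k : Int) := by
  unfold pvJ
  rw [List.range_succ, List.map_append, List.map_singleton, join_snoc]
  · simp [Int.ofNat_eq_natCast]
  · simp; omega

theorem pvJ_one : pvJ 1 = pvTerm 0 := by
  unfold pvJ
  simp [join_singleton]

theorem str_empty_append (x : String) : "" ++ x = x := by
  apply String.ext; simp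

theorem term_split (a : String) (i : Int) :
    a ++ "source" ++ PySem.Int.toStr i ++ "_feature_count" = a ++ pvTerm i := by
  apply String.ext; simp [pvTerm, List.append_assoc]

theorem term_split_plus (a : String) (i : Int) :
    a ++ " + source" ++ PySem.Int.toStr i ++ "_feature_count" = a ++ " + " ++ pvTerm i := by
  apply String.ext; simp [String.toList_append, pvTerm, List.append_assoc]

-- one step of A's loop: the 'i == participants - 1' test is irrelevant to the result
theorem stepA (p : Int) (ls le : List String) (s e : String) (i : Int) :
    pvStepA p (ls, le, s, e) i =
      (let ns := if i = 0 then s ++ pvTerm i else s ++ " + " ++ pvTerm i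
       let ne := ns ++ " + " ++ pvTerm (i + 1)
       (ls ++ [ns], le ++ [ne], ns, ne)) := by
  unfold pvStepA
  by_cases h0 : i = 0
  · subst h0
    simp [term_split, term_split_plus]
  · by_cases h1 : i = p - 1
    · have hne : p - 1 ≠ 0 := h1 ▸ h0
      simp [h1, hne, term_split_plus]
    · simp [h0, h1, term_split_plus]

theorem loopA_closed (p : Int) (n : Nat) (hn : 1 ≤ n) :
    (PySem.List.pyRange 0 (n : Int) 1).foldl (pvStepA p) ([], [], "", "") =
      ((List.range n).map (fun k => pvJ (k + 1)),
       (List.range n).map (fun k => pvJ (k + 2)),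
       pvJ n, pvJ (n + 1)) := by
  induction n with
  | zero => omega
  | succ m ih =>
      by_cases hm : m = 0
      · subst hm
        rw [show ((0 + 1 : Nat) : Int) = (0 : Int) + 1 by norm_num,
            PySem.List.pyRange_one_singleton, List.foldl_cons, List.foldl_nil, stepA]
        rw [str_empty_append]
        have h2 : pvJ 2 = pvTerm 0 ++ " + " ++ pvTerm 1 := by
          rw [show (2 : Nat) = 1 + 1 from rfl, pvJ_succ 1 le_rfl, pvJ_one]; norm_num
        simp [List.range_succ, pvJ_one, h2]
      · have hm1 : 1 ≤ m := by omega
        have hsplit : PySem.List.pyRange 0 ((m + 1 : Nat) : Int) 1 =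
            PySem.List.pyRange 0 (m : Nat) 1 ++ [(m : Int)] := by
          push_cast
          exact PySem.List.pyRange_one_succ_right (by positivity)
        rw [hsplit, List.foldl_append, List.foldl_cons, List.foldl_nil, ih hm1, stepA]
        have hne : ((m : Int)) ≠ 0 := by exact_mod_cast hm
        simp only [if_neg hne]
        have e1 : pvJ m ++ " + " ++ pvTerm (m : Int) = pvJ (m + 1) := (pvJ_succ m hm1).symm
        have e2 : pvJ (m + 1) ++ " + " ++ pvTerm ((m : Int) + 1) = pvJ (m + 2) := by
          have := (pvJ_succ (m + 1) (by omega)).symm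
          push_cast at this ⊢
          exact this
        refine Prod.ext ?_ (Prod.ext ?_ (Prod.ext ?_ ?_)) <;>
          simp [List.range_succ, e1, e2]

theorem slice_nil_eq {α : Type} (a b : Option Int) : PySem.List.slice ([] : List α) a b = [] := by
  simp [PySem.List.slice]

-- ===== VERDICT (by name: the statement is the Claim_ definition above) =====
theorem parse_read_hetero_dataset_loop_spec : Claim_equal_parse_read_hetero_dataset_loop := by
  intro p _
  unfold Spec_parse_read_hetero_dataset_loop
  by_cases hp : p ≤ 0
  · have hr : PySem.List.pyRange 0 p 1 = [] := PySem.List.pyRange_one_eq_nil hp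
    show parse_read_hetero_dataset_loop p = parse_read_hetero_dataset_loop_alt p
    unfold parse_read_hetero_dataset_loop parse_read_hetero_dataset_loop_alt
    simp [hr, slice_nil_eq]
  · obtain ⟨n, rfl⟩ : ∃ n : Nat, p = (n : Int) := ⟨p.toNat, (Int.toNat_of_nonneg (by omega)).symm⟩
    have hn : 1 ≤ n := by omega
    show parse_read_hetero_dataset_loop (n : Int) = parse_read_hetero_dataset_loop_alt (n : Int)
    have hA := loopA_closed ((n : Int)) n hn
    simp only [parse_read_hetero_dataset_loop, parse_read_hetero_dataset_loop_alt, hA]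
    have hc : ((n : Int) - 1) = ((n - 1 : Nat) : Int) := by omega
    have hsl : ∀ (xs : List String), PySem.List.slice xs (some 0) (some ((n : Int) - 1)) = xs.take (n - 1) := by
      intro xs
      rw [hc]
      simp [PySem.List.slice_to_natCast]
    have hpy : PySem.List.pyRange 0 (n : Int) 1 = (List.range n).map (fun k => ((k : Nat) : Int)) := by
      rw [PySem.List.pyRange_one]
      simp
    simp only [hsl, hpy, List.map_map]
    have htm : ∀ (f : Nat → String), List.take (n - 1) ((List.range n).map f) = (List.range (n - 1)).map f := by
      intro f
      rw [← List.map_take, List.take_range, min_eq_left (by omega)]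
    have hent : ∀ (k m : Nat), k + m ≤ n →
        PySem.Str.join " + "
          (PySem.List.slice ((List.range n).map ((fun i => "source" ++ PySem.Int.toStr i ++ "_feature_count") ∘ fun (j : Nat) => ((j : Nat) : Int)))
            none (some ((k : Int) + (m : Int)))) = pvJ (k + m) := by
      intro k m hkm
      rw [show ((k : Int) + (m : Int)) = ((k + m : Nat) : Int) by push_cast; ring]
      rw [PySem.List.slice_to_natCast, ← List.map_take, List.take_range, min_eq_left hkm]
      unfold pvJ
      simp [Function.comp_def, pvTerm, Int.ofNat_eq_natCast]
    have hsl2 : ∀ (xs : List String), PySem.List.slice xs (some 1) (some ((n : Int))) = (xs.drop 1).take (n - 1) := by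
      intro xs
      rw [PySem.List.slice_toNat xs (a := 1) (b := (n : Int)) (by norm_num) (by positivity)]
      congr 1
    simp only [hsl2]
    have hdrop : ∀ (f : Nat → String), (((List.range n).map f).drop 1).take (n - 1) = (List.range (n - 1)).map (fun k => f (1 + k)) := by
      intro f
      rw [← List.map_drop, List.range_eq_range', List.drop_range', List.range'_eq_map_range, List.map_map]
      exact List.take_of_length_le (by simp)
    refine Prod.ext rfl (Prod.ext ?_ ?_)
    · simp only [htm]
      apply List.map_congr_left
      intro k hk
      simp only [List.mem_range] at hk
      have := (hent k 1 (by omega)).symm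
      simpa using this
    · simp only [htm, hdrop]
      apply List.map_congr_left
      intro k hk
      simp only [List.mem_range] at hk
      have h1 := (hent (1 + k) 1 (by omega))
      rw [show (1 + k + 1) = k + 2 by omega] at h1
      have := h1.symm
      simpa [add_comm] using this
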